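-- pv_equiv track=rewrite | github.com/davidgbe/nlp | utf8encoder.py | create_prefix
-- ===== SOURCE A (Python) =====
-- def create_prefix(num):
--   pre = 0
--   for i in range(num):
--     pre = pre | 1
--     pre = pre << 1
--   for j in range(7 - num):
--     pre = pre << 1
--   return pre
-- ===== SOURCE B (Python) =====
-- def create_prefix(num):
--   pre = ((1 << num) - 1) << 1 if num > 0 else 0
--   if num < 7:
--     pre <<= 7 - num
--   return pre
-- ===== Notes on version B (the rewrite author's own statement) =====
-- stated objective: simpler
-- what changed: Both bit-building loops are replaced by the closed form ((1<<num)-1)<<1, shifted left by the remaining 7-num positions when num<7.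
import Mathlib
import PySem

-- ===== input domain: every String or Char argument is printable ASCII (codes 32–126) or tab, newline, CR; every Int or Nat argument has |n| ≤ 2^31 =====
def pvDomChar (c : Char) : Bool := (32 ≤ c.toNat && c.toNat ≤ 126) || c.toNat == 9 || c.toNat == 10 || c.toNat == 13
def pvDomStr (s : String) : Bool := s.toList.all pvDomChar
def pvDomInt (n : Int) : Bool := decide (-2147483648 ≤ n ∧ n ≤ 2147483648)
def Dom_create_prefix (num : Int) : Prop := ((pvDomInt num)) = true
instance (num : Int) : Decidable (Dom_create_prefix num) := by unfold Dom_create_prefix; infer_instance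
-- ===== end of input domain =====

-- B replaces both bit-building loops by the closed form ((1<<num)-1)<<1 shifted by the
-- remaining 7-num positions (objective: simpler).

-- ===== PORT A =====
-- first loop: pre = (pre | 1) << 1 for each i in range(num); second loop: pre <<= 1, 7-num times
def create_prefix (num : Int) : Int :=
  let pre : Int := (PySem.List.pyRange 0 num 1).foldl (fun p _ => (p.lor 1) * 2) 0
  (PySem.List.pyRange 0 (7 - num) 1).foldl (fun p _ => p * 2) pre

-- ===== PORT B =====
-- ((1 << num) - 1) << 1 if num > 0 else 0; then << (7-num) if num < 7
def create_prefix_alt (num : Int) : Int :=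
  let pre : Int := if num > 0 then (2 ^ num.toNat - 1) * 2 else 0
  if num < 7 then pre * 2 ^ (7 - num).toNat else pre

-- ===== PRECONDITION & SPEC =====
def Spec_create_prefix (num : Int) (out : Int) : Prop := out = create_prefix_alt num
instance (num : Int) (out : Int) : Decidable (Spec_create_prefix num out) := by unfold Spec_create_prefix; infer_instance

-- ===== CLAIM (what is proved, stated in full; the proofs are below) =====
def Claim_equal_create_prefix : Prop := ∀ (num : Int), Dom_create_prefix num → Spec_create_prefix num (create_prefix num)

-- ===== LEMMAS AND PROOFS =====

theorem pv_nat_lor_one (a : Nat) : (2*a) ||| 1 = 2*a+1 := by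
  have h := Nat.lor_bit false a true 0
  simp [Nat.bit] at h
  omega

theorem pv_int_lor_one (a : Int) (h : 0 ≤ a) : (2*a).lor 1 = 2*a+1 := by
  obtain ⟨n, rfl⟩ := Int.eq_ofNat_of_zero_le h
  have h2 : ((2*n : Nat) : Int).lor ((1:Nat):Int) = ((2*n ||| 1 : Nat) : Int) := rfl
  rw [pv_nat_lor_one] at h2
  push_cast at h2
  convert h2 using 2

theorem pv_loop1 (n : Nat) :
    (List.range n).foldl (fun (p : Int) (_ : Nat) => (p.lor 1) * 2) 0 = (2^n - 1) * 2 := by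
  induction n with
  | zero => simp
  | succ n ih =>
    rw [List.range_succ, List.foldl_append, ih]
    simp only [List.foldl_cons, List.foldl_nil]
    have h1 : (1:Int) ≤ 2^n := one_le_pow₀ (by norm_num)
    have : ((2^n - 1 : Int) * 2).lor 1 = (2^n - 1) * 2 + 1 := by
      have h2 := pv_int_lor_one (2^n - 1) (by omega)
      rw [mul_comm] at h2
      rw [h2]; try ring
    rw [this]; rw [pow_succ]; ring

theorem pv_loop2 (n : Nat) (p : Int) :
    (List.range n).foldl (fun (q : Int) (_ : Nat) => q * 2) p = p * 2^n := by
  induction n with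
  | zero => simp
  | succ n ih =>
    rw [List.range_succ, List.foldl_append, ih]
    simp only [List.foldl_cons, List.foldl_nil]
    rw [pow_succ]; ring

theorem pv_foldl_pyRange_const {f : Int → Int} (b : Int) (init : Int) :
    (PySem.List.pyRange 0 b 1).foldl (fun p _ => f p) init
      = (List.range b.toNat).foldl (fun (p : Int) (_ : Nat) => f p) init := by
  rw [PySem.List.pyRange_one, List.foldl_map]
  simp

theorem pv_create_prefix_closed (num : Int) :
    create_prefix num = (2 ^ num.toNat - 1) * 2 * 2 ^ (7 - num).toNat := by
  unfold create_prefix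
  rw [pv_foldl_pyRange_const, pv_foldl_pyRange_const, pv_loop1, pv_loop2]

-- ===== VERDICT (by name: the statement is the Claim_ definition above) =====
theorem create_prefix_spec : Claim_equal_create_prefix := by
  intro num _
  unfold Spec_create_prefix create_prefix_alt
  rw [pv_create_prefix_closed]
  by_cases h0 : num > 0
  · by_cases h7 : num < 7
    · simp [h0, h7]
    · have : (7 - num).toNat = 0 := by omega
      simp [h0, h7, this]
  · have : num.toNat = 0 := by omega
    simp [h0, this]
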